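-- pv_equiv track=rewrite | github.com/gnawre31/CCPS109-109-Python-Problems | labs109.py | bulgarian_solitaire
-- ===== SOURCE A (Python) =====
-- def bulgarian_solitaire(piles, k):
--     counter = 0
--     total_sum = int(k*(k+1)//2)
--     check_list = list(range(1, k+1))
--     piles = [i for i in piles if i != 0]
--     while True:
--         if all(x in piles for x in check_list): break
--         else:
--             piles = [x - 1 for x in piles]
--             piles = [i for i in piles if i != 0]
--             appended_value = total_sum - sum(piles)
--             piles.append(appended_value)
--             counter +=1
--     return counter
-- ===== SOURCE B (Python) =====
-- def bulgarian_solitaire(piles, k):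
--     # Lazy-offset histogram: hist maps (pile size + moves) -> number of piles of
--     # that size, so a move never rewrites the histogram; piles of current size 1
--     # vanish by reading one key, the new pile's size comes from a running count
--     # and running sum, and the goal test reads k keys. O(1) dict work per move.
--     total = k * (k + 1) // 2
--     hist = {}
--     count = 0
--     ssum = 0
--     for p in piles:
--         if p != 0:
--             hist[p] = hist.get(p, 0) + 1
--             count += 1
--             ssum += p
--     moves = 0
--     while any(hist.get(x + moves, 0) == 0 for x in range(1, k + 1)):
--         ones = hist.get(moves + 1, 0)   # piles of current size 1 disappear
--         count -= ones
--         ssum -= ones + count            # the surviving piles shrink by one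
--         a = total - ssum                # size of the newly gathered pile
--         moves += 1
--         key = a + moves
--         hist[key] = hist.get(key, 0) + 1
--         count += 1
--         ssum += a
--     return moves
-- ===== Notes on version B (the rewrite author's own statement) =====
-- stated objective: faster
-- what changed: B replaces A's per-pile list simulation by a lazy-offset histogram: a dict keyed by pile size + moves (so a move never rewrites the piles) plus a running pile count and running sum, making each move O(1) dict work instead of A's three full passes over the pile list plus membership rescans; intended as faster — a timing run measured B 23x faster at the largest size both versions finished, unconfirmed on inputs where A itself times out.
import Mathlib
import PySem

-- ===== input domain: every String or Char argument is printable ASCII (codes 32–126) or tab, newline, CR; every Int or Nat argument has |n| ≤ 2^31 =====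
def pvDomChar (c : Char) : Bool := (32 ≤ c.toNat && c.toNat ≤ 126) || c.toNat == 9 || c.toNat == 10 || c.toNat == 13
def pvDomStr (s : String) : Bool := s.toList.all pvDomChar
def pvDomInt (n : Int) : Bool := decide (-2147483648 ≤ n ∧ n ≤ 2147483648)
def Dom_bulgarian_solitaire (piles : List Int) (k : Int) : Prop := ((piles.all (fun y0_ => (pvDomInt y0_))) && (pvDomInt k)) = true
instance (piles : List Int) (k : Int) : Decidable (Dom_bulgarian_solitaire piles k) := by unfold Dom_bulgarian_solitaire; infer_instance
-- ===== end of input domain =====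

-- B replaces A's per-pile list simulation by a lazy-offset histogram (dict mapping
-- pile size + moves -> how many piles have that size) with a running pile count and
-- running sum, so a move does O(1) dict work instead of rewriting every pile
-- (objective: faster; a timing run measured B 23x faster at the largest size
-- both versions finished, unconfirmed on inputs where A itself times out).
-- Both 'while True' loops are ported with the same generous fuel expression, a totality
-- guard only: with identical fuel and step-for-step corresponding states the two ports
-- agree on EVERY input, so the claim is total (no Pre_).

-- Shared totality guard for the two while-loop ports (never the algorithm's business).
def pvFuel (piles : List Int) (k : Int) : Nat :=
  let x := (piles.map Int.natAbs).sum + k.toNat * k.toNat + piles.length + 16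
  x * x

-- ===== PORT A =====
-- one move of A: decrement every pile, drop zeros, append total_sum - sum(piles)
def pvStepA (total : Int) (piles : List Int) : List Int :=
  let d := (piles.map (fun x => x - 1)).filter (fun i => i != 0)
  d ++ [total - d.sum]

-- A's 'while True' loop; the check is re-evaluated at the top of every iteration
def pvLoopA (total : Int) (check : List Int) : Nat → List Int → Int → Int
  | 0, _, counter => counter
  | fuel + 1, piles, counter =>
    if check.all (fun x => piles.contains x) then counter
    else pvLoopA total check fuel (pvStepA total piles) (counter + 1)

def bulgarian_solitaire (piles : List Int) (k : Int) : Int :=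
  let total_sum := PySem.Int.floordiv (k * (k + 1)) 2
  let check_list := PySem.List.pyRange 1 (k + 1) 1
  pvLoopA total_sum check_list (pvFuel piles k) (piles.filter (fun i => i != 0)) 0

-- ===== PORT B =====
-- B's 'while any(hist.get(x + moves, 0) == 0 …)' loop; one move reads the dying
-- size-1 key, updates the running count and sum, and inserts the gathered pile
def pvLoopB (total : Int) (k : Int) : Nat → PySem.Dict Int Int → Int → Int → Int → Int
  | 0, _, _, _, moves => moves
  | fuel + 1, h, count, ssum, moves =>
    if (PySem.List.pyRange 1 (k + 1) 1).any (fun x => h.getD (x + moves) 0 == 0) then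
      let ones := h.getD (moves + 1) 0
      let count' := count - ones
      let ssum' := ssum - (ones + count')
      let a := total - ssum'
      let moves' := moves + 1
      let key := a + moves'
      pvLoopB total k fuel (h.insert key (h.getD key 0 + 1)) (count' + 1) (ssum' + a) moves'
    else moves

def bulgarian_solitaire_alt (piles : List Int) (k : Int) : Int :=
  let total := PySem.Int.floordiv (k * (k + 1)) 2
  let st := piles.foldl
    (fun (st : PySem.Dict Int Int × Int × Int) p =>
      if p != 0 then (st.1.insert p (st.1.getD p 0 + 1), st.2.1 + 1, st.2.2 + p)
      else st)
    (PySem.Dict.empty, 0, 0)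
  pvLoopB total k (pvFuel piles k) st.1 st.2.1 st.2.2 0

-- ===== PRECONDITION & SPEC =====
def Spec_bulgarian_solitaire (piles : List Int) (k : Int) (out : Int) : Prop := out = bulgarian_solitaire_alt piles k
instance (piles : List Int) (k : Int) (out : Int) : Decidable (Spec_bulgarian_solitaire piles k out) := by unfold Spec_bulgarian_solitaire; infer_instance

-- ===== CLAIM =====
def Claim_equal_bulgarian_solitaire : Prop := ∀ (piles : List Int) (k : Int), Dom_bulgarian_solitaire piles k → Spec_bulgarian_solitaire piles k (bulgarian_solitaire piles k)

-- ===== LEMMAS AND PROOFS =====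

-- the loop state (histogram, count, sum) represents the pile list l at move m:
-- looking up any positive size (offset by m) counts the piles of that size, and
-- count/ssum are the number and total of the piles
def pvRep (h : PySem.Dict Int Int) (count ssum m : Int) (l : List Int) : Prop :=
  (∀ t : Int, 0 < t → h.getD (t + m) 0 = (l.count t : Int)) ∧
  count = l.length ∧ ssum = l.sum

-- splitting a sum at one value: sum = value * multiplicity + sum of the rest
lemma pv_sum_split (s : Int) (l : List Int) :
    l.sum = s * (l.count s : Int) + (l.filter (fun x => x != s)).sum := by
  induction l with
  | nil => simp
  | cons a t ih =>
    by_cases ha : a = s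
    · subst ha
      simp only [List.sum_cons, List.count_cons_self, List.filter_cons]
      rw [if_neg (by simp)]
      push_cast
      rw [ih]; ring
    · simp only [List.sum_cons, List.filter_cons]
      rw [List.count_cons_of_ne (by simpa using ha), if_pos (by simpa using ha)]
      simp only [List.sum_cons]
      rw [ih]; ring

-- splitting a length at one value
lemma pv_len_split (s : Int) (l : List Int) :
    (l.length : Int) = (l.count s : Int) + ((l.filter (fun x => x != s)).length : Int) := by
  induction l with
  | nil => simp
  | cons a t ih =>
    by_cases ha : a = s
    · subst ha
      simp only [List.length_cons, List.count_cons_self, List.filter_cons]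
      rw [if_neg (by simp)]
      push_cast at ih ⊢
      omega
    · simp only [List.length_cons, List.filter_cons]
      rw [List.count_cons_of_ne (by simpa using ha), if_pos (by simpa using ha)]
      simp only [List.length_cons]
      push_cast at ih ⊢
      omega

-- decrementing every element lowers the sum by the length
lemma pv_map_sub_sum (xs : List Int) :
    (xs.map (fun x => x - 1)).sum = xs.sum - (xs.length : Int) := by
  induction xs with
  | nil => simp
  | cons a t ih =>
    simp only [List.map_cons, List.sum_cons, List.length_cons, ih]
    push_cast
    ring

-- decrement-then-drop-zeros = drop-ones-then-decrement
lemma pv_dec_eq (piles : List Int) :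
    (piles.map (fun x => x - 1)).filter (fun i => i != 0)
      = (piles.filter (fun p => p != 1)).map (fun p => p - 1) := by
  rw [List.filter_map]
  congr 1
  apply List.filter_congr
  intro x _
  simp only [Function.comp_apply]
  rw [Bool.eq_iff_iff]
  simp [sub_eq_zero]

-- counting a positive size in the decremented list reads the next size up
lemma pv_count_dec (l : List Int) (t : Int) (ht : 0 < t) :
    (((l.filter (fun p => p != 1)).map (fun p => p - 1)).count t : Int)
      = (l.count (t + 1) : Int) := by
  have hcm := List.count_map_of_injective (l.filter (fun p => p != 1))
    (fun p => p - 1) (fun a b e => by have : a - 1 = b - 1 := e; omega) (t + 1)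
  simp only [add_sub_cancel_right] at hcm
  rw [hcm, List.count_filter (p := fun p => p != 1) (by simpa using by omega)]

-- one move preserves the representation: B's O(1) move tracks A's list move
lemma pv_step (total : Int) (h : PySem.Dict Int Int) (count ssum m : Int)
    (l : List Int) (hr : pvRep h count ssum m l) :
    pvRep
      (h.insert (total - (ssum - (h.getD (m + 1) 0 + (count - h.getD (m + 1) 0))) + (m + 1))
        (h.getD (total - (ssum - (h.getD (m + 1) 0 + (count - h.getD (m + 1) 0))) + (m + 1)) 0 + 1))
      ((count - h.getD (m + 1) 0) + 1)
      ((ssum - (h.getD (m + 1) 0 + (count - h.getD (m + 1) 0)))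
        + (total - (ssum - (h.getD (m + 1) 0 + (count - h.getD (m + 1) 0)))))
      (m + 1) (pvStepA total l) := by
  obtain ⟨hget, hcnt, hsum⟩ := hr
  set d : List Int := (l.filter (fun p => p != 1)).map (fun p => p - 1) with hd
  have hdec : (l.map (fun x => x - 1)).filter (fun i => i != 0) = d := pv_dec_eq l
  have hones : h.getD (m + 1) 0 = (l.count 1 : Int) := by
    have := hget 1 (by omega)
    rw [add_comm] at this
    exact this
  have hlen : (d.length : Int) = (l.length : Int) - (l.count 1 : Int) := by
    rw [hd, List.length_map]
    have := pv_len_split 1 l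
    omega
  have hdsum : d.sum = l.sum - (l.length : Int) := by
    have h1 := pv_sum_split 1 l
    have h2 := pv_len_split 1 l
    rw [hd, pv_map_sub_sum]
    omega
  have hssum' : ssum - (h.getD (m + 1) 0 + (count - h.getD (m + 1) 0)) = d.sum := by
    rw [hones, hcnt, hsum, hdsum]; ring
  have ha : total - (ssum - (h.getD (m + 1) 0 + (count - h.getD (m + 1) 0)))
      = total - d.sum := by rw [hssum']
  show pvRep _ _ _ _ (((l.map (fun x => x - 1)).filter (fun i => i != 0))
    ++ [total - ((l.map (fun x => x - 1)).filter (fun i => i != 0)).sum])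
  rw [hdec]
  refine ⟨?_, ?_, ?_⟩
  · intro t ht
    rw [ha, PySem.Dict.getD_insert]
    rw [List.count_append]
    by_cases hta : t = total - d.sum
    · rw [if_pos (by rw [hta]), hta]
      have hkey : total - d.sum + (m + 1) = (total - d.sum + 1) + m := by ring
      rw [hkey, hget (total - d.sum + 1) (by omega)]
      have : ((d.count (total - d.sum) : Int)) = (l.count (total - d.sum + 1) : Int) :=
        pv_count_dec l _ (by omega)
      have hone : (List.count (total - d.sum) [total - d.sum] : Int) = 1 := by simp
      push_cast
      omega
    · rw [if_neg (by intro e; exact hta (by omega))]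
      have hkey : t + (m + 1) = (t + 1) + m := by ring
      rw [hkey, hget (t + 1) (by omega)]
      have hcd : ((d.count t : Int)) = (l.count (t + 1) : Int) := pv_count_dec l t ht
      have hz : (List.count t [total - d.sum] : Int) = 0 := by
        rw [List.count_eq_zero.2 (by simpa using hta)]
        simp
      push_cast
      omega
  · rw [hones, hcnt]
    have := pv_len_split 1 l
    simp only [List.length_append, List.length_cons, List.length_nil, hd, List.length_map]
    push_cast
    omega
  · rw [hssum', List.sum_append]
    simp

-- the two stop tests are complementary booleans under the representation
lemma pv_cond (h : PySem.Dict Int Int) (count ssum m : Int) (l : List Int)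
    (hr : pvRep h count ssum m l) (check : List Int) (hpos : ∀ x ∈ check, 0 < x) :
    (check.any (fun x => h.getD (x + m) 0 == 0)) = !(check.all (fun x => l.contains x)) := by
  induction check with
  | nil => simp
  | cons a t ih =>
    have hx : (h.getD (a + m) 0 == 0) = !(l.contains a) := by
      rw [hr.1 a (hpos a List.mem_cons_self)]
      by_cases hm : a ∈ l
      · have hc : l.count a ≠ 0 := fun e => (List.count_eq_zero.1 e) hm
        simp [hm]
        exact_mod_cast hc
      · rw [List.count_eq_zero.2 hm]
        simp [hm]
    simp only [List.any_cons, List.all_cons, Bool.not_and, hx,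
      ← ih (fun x hx => hpos x (List.mem_cons_of_mem _ hx))]

-- the loops agree on representing states, with identical fuel
lemma pv_loop (total k : Int) : ∀ (fuel : Nat) (h : PySem.Dict Int Int)
    (count ssum m : Int) (l : List Int), pvRep h count ssum m l →
    pvLoopB total k fuel h count ssum m
      = pvLoopA total (PySem.List.pyRange 1 (k + 1) 1) fuel l m := by
  intro fuel
  induction fuel with
  | zero => intro h count ssum m l _; rfl
  | succ n ih =>
    intro h count ssum m l hr
    have hpos : ∀ x ∈ PySem.List.pyRange 1 (k + 1) 1, (0 : Int) < x := by
      intro x hx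
      have := (PySem.List.mem_pyRange_one.1 hx).1
      omega
    show (if (PySem.List.pyRange 1 (k + 1) 1).any (fun x => h.getD (x + m) 0 == 0) then
            pvLoopB total k n
              (h.insert (total - (ssum - (h.getD (m + 1) 0 + (count - h.getD (m + 1) 0))) + (m + 1))
                (h.getD (total - (ssum - (h.getD (m + 1) 0 + (count - h.getD (m + 1) 0))) + (m + 1)) 0 + 1))
              ((count - h.getD (m + 1) 0) + 1)
              ((ssum - (h.getD (m + 1) 0 + (count - h.getD (m + 1) 0)))
                + (total - (ssum - (h.getD (m + 1) 0 + (count - h.getD (m + 1) 0)))))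
              (m + 1)
          else m)
       = (if (PySem.List.pyRange 1 (k + 1) 1).all (fun x => l.contains x) then m
          else pvLoopA total (PySem.List.pyRange 1 (k + 1) 1) n (pvStepA total l) (m + 1))
    rw [pv_cond h count ssum m l hr _ hpos]
    cases hc : (PySem.List.pyRange 1 (k + 1) 1).all (fun x => l.contains x)
    · simp only [Bool.not_false, if_pos, if_neg Bool.false_ne_true]
      exact ih _ _ _ _ (pvStepA total l) (pv_step total h count ssum m l hr)
    · simp

-- the initial histogram loop represents the zero-filtered pile list at move 0
lemma pv_init_fold (xs : List Int) : ∀ (h : PySem.Dict Int Int) (c s : Int)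
    (l0 : List Int), (∀ t : Int, h.getD t 0 = (l0.count t : Int)) →
    c = l0.length → s = l0.sum →
    (∀ t : Int, (xs.foldl
        (fun (st : PySem.Dict Int Int × Int × Int) p =>
          (st.1.insert p (st.1.getD p 0 + 1), st.2.1 + 1, st.2.2 + p)) (h, c, s)).1.getD t 0
      = ((l0 ++ xs).count t : Int)) ∧
    (xs.foldl
        (fun (st : PySem.Dict Int Int × Int × Int) p =>
          (st.1.insert p (st.1.getD p 0 + 1), st.2.1 + 1, st.2.2 + p)) (h, c, s)).2.1
      = ((l0 ++ xs).length : Int) ∧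
    (xs.foldl
        (fun (st : PySem.Dict Int Int × Int × Int) p =>
          (st.1.insert p (st.1.getD p 0 + 1), st.2.1 + 1, st.2.2 + p)) (h, c, s)).2.2
      = (l0 ++ xs).sum := by
  induction xs with
  | nil =>
    intro h c s l0 hget hc hs
    simp only [List.foldl_nil, List.append_nil]
    exact ⟨hget, by simpa using hc, by simpa using hs⟩
  | cons p xs ih =>
    intro h c s l0 hget hc hs
    have hstep := ih (h.insert p (h.getD p 0 + 1)) (c + 1) (s + p) (l0 ++ [p])
      (by
        intro t
        rw [PySem.Dict.getD_insert, List.count_append]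
        by_cases htp : t = p
        · subst htp
          rw [if_pos rfl, hget t]
          push_cast
          simp
        · rw [if_neg htp, hget t]
          have : List.count t [p] = 0 := List.count_eq_zero.2 (by simpa using htp)
          rw [this]
          simp)
      (by rw [hc, List.length_append]; push_cast; simp)
      (by rw [hs, List.sum_append]; simp)
    simp only [List.foldl_cons]
    simpa [List.append_assoc] using hstep

-- ===== VERDICT =====
theorem bulgarian_solitaire_spec : Claim_equal_bulgarian_solitaire := by
  intro piles k _
  unfold Spec_bulgarian_solitaire bulgarian_solitaire bulgarian_solitaire_alt
  rw [← List.foldl_filter]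
  obtain ⟨hget, hc, hs⟩ := pv_init_fold (piles.filter (fun p => p != 0))
    PySem.Dict.empty 0 0 []
    (fun t => by rw [PySem.Dict.getD_of_not_contains _ _ rfl]; simp)
    (by simp) (by simp)
  refine (pv_loop (PySem.Int.floordiv (k * (k + 1)) 2) k (pvFuel piles k) _ _ _ 0
    (piles.filter (fun i => i != 0)) ⟨?_, ?_, ?_⟩).symm
  · intro t _
    rw [add_zero, hget t]
    simp
  · rw [hc]; simp
  · rw [hs]; simp
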